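-- pv_equiv track=rewrite | github.com/FiditeNemini/LeMiCa | LeMiCa4ErnieImage/inference_ernieimage.py | resolve_cache_plan
-- ===== SOURCE A (Python) =====
-- from typing import Dict, List, Optional, Tuple
--
-- def get_qwen_style_calc_dict() -> Dict[int, List[int]]:
--     return {
--         25: [0, 1, 2, 3, 4, 5, 6, 7, 8, 9, 10, 11, 12, 13, 14, 15, 16, 22, 31, 38, 43, 46, 47, 48, 49],
--         17: [0, 1, 2, 3, 4, 5, 6, 7, 8, 9, 10, 17, 27, 37, 44, 48, 49],
--         10: [0, 1, 3, 7, 14, 21, 28, 35, 42, 49],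
--     }
--
-- def resolve_cache_plan(cache: str, num_inference_steps: int) -> Tuple[str, List[bool], int]:
--     cache = cache.lower()
--     speed_modes = {"slow": 25, "medium": 17, "fast": 10}
--     calc_dict = get_qwen_style_calc_dict()
--
--     if cache in speed_modes:
--         target_step = speed_modes[cache]
--     elif cache.isdigit():
--         target_step = int(cache)
--     else:
--         raise ValueError(
--             f"Invalid --cache value: {cache}. Use one of {list(speed_modes.keys())} or one of {list(calc_dict.keys())}."
--         )
--
--     if target_step not in calc_dict:
--         raise ValueError(f"cache step {target_step} not found in calc_dict: {sorted(calc_dict.keys())}")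
--
--     calc_steps = calc_dict[target_step]
--     bool_list = [i in calc_steps for i in range(num_inference_steps)]
--     if num_inference_steps > 0:
--         bool_list[0] = True
--         bool_list[-1] = True
--     return cache, bool_list, target_step
-- ===== SOURCE B (Python) =====
-- from typing import Dict, List, Tuple
--
-- def get_qwen_style_calc_dict() -> Dict[int, List[int]]:
--     return {
--         25: [0, 1, 2, 3, 4, 5, 6, 7, 8, 9, 10, 11, 12, 13, 14, 15, 16, 22, 31, 38, 43, 46, 47, 48, 49],
--         17: [0, 1, 2, 3, 4, 5, 6, 7, 8, 9, 10, 17, 27, 37, 44, 48, 49],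
--         10: [0, 1, 3, 7, 14, 21, 28, 35, 42, 49],
--     }
--
-- def resolve_cache_plan(cache: str, num_inference_steps: int) -> Tuple[str, List[bool], int]:
--     cache = cache.lower()
--     if cache == "slow":
--         target_step = 25
--     elif cache == "medium":
--         target_step = 17
--     elif cache == "fast":
--         target_step = 10
--     elif cache.isdigit():
--         target_step = int(cache)
--     else:
--         raise ValueError(f"Invalid --cache value: {cache}. Use 'slow'/'medium'/'fast' or a step count.")
--
--     calc_steps = get_qwen_style_calc_dict().get(target_step)
--     if calc_steps is None:
--         raise ValueError(f"cache step {target_step} not found in calc_dict: [10, 17, 25]")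
--
--     n = num_inference_steps
--     active = set(s for s in calc_steps if 0 <= s < n)
--     if n > 0:
--         active.add(0)
--         active.add(n - 1)
--     # run-length construction: emit False-gaps and a True at each active index
--     bool_list = []
--     prev = 0
--     for a in sorted(active):
--         bool_list.extend([False] * (a - prev))
--         bool_list.append(True)
--         prev = a + 1
--     bool_list.extend([False] * (n - prev))
--     return cache, bool_list, target_step
-- ===== Notes on version B (the rewrite author's own statement) =====
-- stated objective: alternative
-- what changed: B computes the set of active indices (in-range calc steps plus the two endpoints) and builds the schedule by run-length construction over the sorted active indices (emit a False-gap then a True per active index), instead of A's per-index membership scan `i in calc_steps` over range(n) followed by endpoint patching; dispatch is a plain if/elif chain instead of dict membership.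
import Mathlib
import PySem

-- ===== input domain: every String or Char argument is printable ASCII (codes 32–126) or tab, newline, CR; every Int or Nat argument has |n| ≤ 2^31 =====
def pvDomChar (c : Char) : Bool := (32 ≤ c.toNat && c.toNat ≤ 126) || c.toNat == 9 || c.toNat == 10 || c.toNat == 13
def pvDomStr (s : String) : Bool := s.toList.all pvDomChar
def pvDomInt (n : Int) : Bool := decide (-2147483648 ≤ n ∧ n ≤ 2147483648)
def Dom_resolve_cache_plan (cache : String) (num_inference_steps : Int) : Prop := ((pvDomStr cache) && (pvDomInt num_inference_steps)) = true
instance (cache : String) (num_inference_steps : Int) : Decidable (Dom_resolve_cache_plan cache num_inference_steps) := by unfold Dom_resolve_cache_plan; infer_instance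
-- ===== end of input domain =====

-- B builds the schedule by run-length construction over the sorted set of active indices
-- (in-range calc steps plus the endpoints), instead of A's per-index membership scan with
-- endpoint patching (objective: alternative; same return values on Pre_).


-- shared module context: get_qwen_style_calc_dict (both Pythons call it verbatim)
def get_qwen_style_calc_dict : PySem.Dict Int (List Int) :=
  PySem.Dict.ofList
    [(25, [0, 1, 2, 3, 4, 5, 6, 7, 8, 9, 10, 11, 12, 13, 14, 15, 16, 22, 31, 38, 43, 46, 47, 48, 49]),
     (17, [0, 1, 2, 3, 4, 5, 6, 7, 8, 9, 10, 17, 27, 37, 44, 48, 49]),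
     (10, [0, 1, 3, 7, 14, 21, 28, 35, 42, 49])]

-- ===== PORT A =====
-- A's dispatch: dict membership in speed_modes, else isdigit/int.  `none` = the ValueError path.
def pvTargetA (cache : String) : Option Int :=
  let speed_modes : PySem.Dict String Int := PySem.Dict.ofList [("slow", 25), ("medium", 17), ("fast", 10)]
  match PySem.Dict.get? speed_modes cache with            -- if cache in speed_modes: speed_modes[cache]
  | some t => some t
  | none => if PySem.Str.strIsdigit cache then PySem.Int.ofStr? cache else none  -- elif cache.isdigit(): int(cache); else raise

-- Where the Python raises ValueError the port returns ("", [], 0); Pre_ excludes those inputs.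
def resolve_cache_plan (cache : String) (num_inference_steps : Int) : String × List Bool × Int :=
  let cache := PySem.Str.lower cache
  match pvTargetA cache with
  | none => ("", [], 0)                                   -- raise ValueError (invalid --cache)
  | some target_step =>
    match PySem.Dict.get? get_qwen_style_calc_dict target_step with
    | none => ("", [], 0)                                 -- raise ValueError (target_step not in calc_dict)
    | some calc_steps =>
      let bool_list := (PySem.List.pyRange 0 num_inference_steps 1).map (fun i => calc_steps.contains i)
      let bool_list :=
        if num_inference_steps > 0 then (bool_list.set 0 true).set (bool_list.length - 1) true
        else bool_list
      (cache, bool_list, target_step)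

-- ===== PORT B =====
-- B's dispatch: a plain if/elif chain on the lowered string.
def pvTargetB (cache : String) : Option Int :=
  if cache = "slow" then some 25
  else if cache = "medium" then some 17
  else if cache = "fast" then some 10
  else if PySem.Str.strIsdigit cache then PySem.Int.ofStr? cache
  else none                                               -- raise ValueError

def resolve_cache_plan_alt (cache : String) (num_inference_steps : Int) : String × List Bool × Int :=
  let cache := PySem.Str.lower cache
  match pvTargetB cache with
  | none => ("", [], 0)
  | some target_step =>
    match PySem.Dict.get? get_qwen_style_calc_dict target_step with  -- .get(target_step)
    | none => ("", [], 0)                                 -- calc_steps is None: raise ValueError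
    | some calc_steps =>
      let n := num_inference_steps
      let active : PySem.Set Int :=                       -- set(s for s in calc_steps if 0 <= s < n)
        PySem.Set.ofList (calc_steps.filter (fun s => decide (0 ≤ s ∧ s < n)))
      let active := if n > 0 then PySem.Set.add (PySem.Set.add active 0) (n - 1) else active
      -- run-length construction over sorted(active): emit a False-gap then a True per active index
      let p := (PySem.List.sorted active (fun x => x) false).foldl
        (fun (p : List Bool × Int) a =>
          (p.1 ++ List.replicate (a - p.2).toNat false ++ [true], a + 1)) ([], 0)
      let bool_list := p.1 ++ List.replicate (n - p.2).toNat false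
      (cache, bool_list, target_step)

-- ===== PRECONDITION & SPEC =====
-- Pre_ excludes exactly the inputs where A raises ValueError: cache (lowered) neither a speed
-- mode name nor a digit string whose int value is a key (25/17/10) of the calc dict.
def Pre_resolve_cache_plan (cache : String) (num_inference_steps : Int) : Prop :=
  let c := PySem.Str.lower cache
  c = "slow" ∨ c = "medium" ∨ c = "fast" ∨
    (PySem.Str.strIsdigit c = true ∧
      (PySem.Int.ofStr? c = some 25 ∨ PySem.Int.ofStr? c = some 17 ∨ PySem.Int.ofStr? c = some 10))
instance (cache : String) (num_inference_steps : Int) : Decidable (Pre_resolve_cache_plan cache num_inference_steps) := by unfold Pre_resolve_cache_plan; infer_instance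

def pvWitness_resolve_cache_plan : String × Int := ("Fast", 12)

def Spec_resolve_cache_plan (cache : String) (num_inference_steps : Int) (out : String × List Bool × Int) : Prop := out = resolve_cache_plan_alt cache num_inference_steps
instance (cache : String) (num_inference_steps : Int) (out : String × List Bool × Int) : Decidable (Spec_resolve_cache_plan cache num_inference_steps out) := by unfold Spec_resolve_cache_plan; infer_instance

-- ===== CLAIM (what is proved, stated in full; the proofs are below) =====
def Claim_equal_resolve_cache_plan : Prop := ∀ (cache : String) (num_inference_steps : Int), Dom_resolve_cache_plan cache num_inference_steps → Pre_resolve_cache_plan cache num_inference_steps → Spec_resolve_cache_plan cache num_inference_steps (resolve_cache_plan cache num_inference_steps)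

-- ===== LEMMAS AND PROOFS =====

-- the list B's fold-and-pad produces, as a structural recursion for the lemmas below
def pvRunTail (L : List Int) (prev n : Int) : List Bool :=
  match L with
  | [] => List.replicate (n - prev).toNat false
  | a :: L => List.replicate (a - prev).toNat false ++ true :: pvRunTail L (a + 1) n

theorem pvFold_eq (L : List Int) (acc : List Bool) (prev n : Int) :
    (L.foldl (fun (p : List Bool × Int) a =>
        (p.1 ++ List.replicate (a - p.2).toNat false ++ [true], a + 1)) (acc, prev)).1 ++
      List.replicate (n -
        (L.foldl (fun (p : List Bool × Int) a =>
          (p.1 ++ List.replicate (a - p.2).toNat false ++ [true], a + 1)) (acc, prev)).2).toNat false =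
    acc ++ pvRunTail L prev n := by
  induction L generalizing acc prev with
  | nil => simp [pvRunTail]
  | cons a L ih =>
    simp only [List.foldl_cons, pvRunTail]
    rw [ih]
    simp [List.append_assoc]

theorem pvRunTail_length (L : List Int) (prev n : Int)
    (hp : L.Pairwise (· < ·)) (h : ∀ a ∈ L, prev ≤ a ∧ a < n) :
    (pvRunTail L prev n).length = (n - prev).toNat := by
  induction L generalizing prev with
  | nil => simp [pvRunTail]
  | cons a L ih =>
    have ha := h a (by simp)
    have hL : ∀ b ∈ L, a + 1 ≤ b ∧ b < n := by
      intro b hb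
      exact ⟨by have := (List.pairwise_cons.mp hp).1 b hb; omega,
             (h b (List.mem_cons_of_mem a hb)).2⟩
    rw [pvRunTail]
    simp [ih (a + 1) (List.pairwise_cons.mp hp).2 hL]
    omega

theorem pvRunTail_getElem? (L : List Int) (prev n : Int)
    (hp : L.Pairwise (· < ·)) (h : ∀ a ∈ L, prev ≤ a ∧ a < n) (j : Nat) (hj : j < (n - prev).toNat) :
    (pvRunTail L prev n)[j]? = some (decide ((prev + (j : Int)) ∈ L)) := by
  induction L generalizing prev j with
  | nil => simp [pvRunTail, hj]
  | cons a L ih =>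
    have ha := h a (by simp)
    have hgt : ∀ b ∈ L, a < b := by
      intro b hb; exact (List.pairwise_cons.mp hp).1 b hb
    have hL : ∀ b ∈ L, a + 1 ≤ b ∧ b < n := by
      intro b hb
      exact ⟨by have := hgt b hb; omega, (h b (List.mem_cons_of_mem a hb)).2⟩
    have hpL : L.Pairwise (· < ·) := (List.pairwise_cons.mp hp).2
    rw [pvRunTail]
    by_cases hlt : j < (a - prev).toNat
    · rw [List.getElem?_append_left (by simpa using hlt), List.getElem?_replicate, if_pos hlt]
      have : ¬ (prev + (j : Int)) ∈ a :: L := by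
        simp only [List.mem_cons]
        rintro (rfl | hm)
        · omega
        · have := hgt _ hm; omega
      simp [this]
    · rw [List.getElem?_append_right (by simpa using Nat.le_of_not_lt hlt)]
      simp only [List.length_replicate]
      by_cases heq : j = (a - prev).toNat
      · subst heq
        simp only [Nat.sub_self, List.getElem?_cons_zero]
        have hmem : prev + (((a - prev).toNat : Nat) : Int) ∈ a :: L := by
          have : prev + (((a - prev).toNat : Nat) : Int) = a := by omega
          rw [this]
          exact List.mem_cons_self
        exact congrArg some (decide_eq_true hmem).symm
      · have hge : (a - prev).toNat + 1 ≤ j := by omega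
        have hsub : j - (a - prev).toNat = (j - (a - prev).toNat - 1) + 1 := by omega
        rw [hsub]
        simp only [List.getElem?_cons_succ]
        rw [ih (a + 1) hpL hL _ (by omega)]
        have hne : prev + (j : Int) ≠ a := by omega
        have harg : (a + 1) + ((j - (a - prev).toNat - 1 : Nat) : Int) = prev + (j : Int) := by
          omega
        rw [harg]
        simp [List.mem_cons, hne]

-- A's dict dispatch and B's if/elif dispatch agree on every string
theorem pvDispatch_eq (c : String) : pvTargetA c = pvTargetB c := by
  by_cases h1 : c = "slow"
  · subst h1; decide
  · by_cases h2 : c = "medium"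
    · subst h2; decide
    · by_cases h3 : c = "fast"
      · subst h3; decide
      · have e : PySem.Dict.ofList [("slow", (25:Int)), ("medium", 17), ("fast", 10)] =
            PySem.Dict.mk [("slow", (25:Int)), ("medium", 17), ("fast", 10)] := by decide
        unfold pvTargetA pvTargetB
        rw [e]
        simp [PySem.Dict.get?, List.find?, h1, h2, h3,
          beq_eq_false_iff_ne.mpr (Ne.symm h1), beq_eq_false_iff_ne.mpr (Ne.symm h2),
          beq_eq_false_iff_ne.mpr (Ne.symm h3)]

-- elementwise value of A's endpoint-patched list
theorem pvASet_getElem? (bl : List Bool) (i : Nat) (hi : i < bl.length) :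
    ((bl.set 0 true).set (bl.length - 1) true)[i]? =
      if i = 0 ∨ i = bl.length - 1 then some true else bl[i]? := by
  rw [List.getElem?_set, List.getElem?_set]
  by_cases h1 : bl.length - 1 = i
  · rw [if_pos h1, if_pos (by simp only [List.length_set]; omega),
        if_pos (Or.inr h1.symm)]
  · rw [if_neg h1]
    by_cases h0 : (0 : Nat) = i
    · rw [if_pos h0, if_pos (by omega), if_pos (Or.inl h0.symm)]
    · rw [if_neg h0, if_neg (by
        rintro (rfl | rfl)
        · exact h0 rfl
        · exact h1 rfl)]

-- the schedule lists of the two ports coincide, for any calc-step list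
theorem pvSchedule_eq (calc_steps : List Int) (n : Int) :
    (let bl := (PySem.List.pyRange 0 n 1).map (fun i => calc_steps.contains i)
     if n > 0 then (bl.set 0 true).set (bl.length - 1) true else bl) =
    (let active : PySem.Set Int :=
        PySem.Set.ofList (calc_steps.filter (fun s => decide (0 ≤ s ∧ s < n)))
     let active := if n > 0 then PySem.Set.add (PySem.Set.add active 0) (n - 1) else active
     let p := (PySem.List.sorted active (fun x => x) false).foldl
        (fun (p : List Bool × Int) a =>
          (p.1 ++ List.replicate (a - p.2).toNat false ++ [true], a + 1)) ([], 0)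
     p.1 ++ List.replicate (n - p.2).toNat false) := by
  dsimp only
  rw [pvFold_eq, List.nil_append]
  set A : List Int :=
    (if n > 0 then
        PySem.Set.add (PySem.Set.add
          (PySem.Set.ofList (calc_steps.filter (fun s => decide (0 ≤ s ∧ s < n)))) 0) (n - 1)
      else PySem.Set.ofList (calc_steps.filter (fun s => decide (0 ≤ s ∧ s < n)))) with hA
  set S : List Int := PySem.List.sorted A (fun x => x) false with hS
  have hndA : A.Nodup := by
    rw [hA]
    split_ifs
    · exact PySem.Set.nodup_add _ _ (PySem.Set.nodup_add _ _ (PySem.Set.nodup_ofList _))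
    · exact PySem.Set.nodup_ofList _
  have hmemA : ∀ x : Int, x ∈ A ↔
      ((x ∈ calc_steps ∧ 0 ≤ x ∧ x < n) ∨ (0 < n ∧ (x = 0 ∨ x = n - 1))) := by
    intro x
    rw [hA]
    by_cases hn : n > 0
    · rw [if_pos hn, PySem.Set.mem_add, PySem.Set.mem_add, PySem.Set.mem_ofList,
        List.mem_filter]
      simp only [decide_eq_true_eq]
      constructor
      · rintro ((⟨h1, h2⟩ | rfl) | rfl)
        · exact Or.inl ⟨h1, h2⟩
        · exact Or.inr ⟨hn, Or.inl rfl⟩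
        · exact Or.inr ⟨hn, Or.inr rfl⟩
      · rintro (⟨h1, h2⟩ | ⟨-, rfl | rfl⟩)
        · exact Or.inl (Or.inl ⟨h1, h2⟩)
        · exact Or.inl (Or.inr rfl)
        · exact Or.inr rfl
    · rw [if_neg hn, PySem.Set.mem_ofList, List.mem_filter]
      simp only [decide_eq_true_eq]
      constructor
      · rintro ⟨h1, h2⟩
        exact Or.inl ⟨h1, h2⟩
      · rintro (⟨h1, h2⟩ | ⟨h1, -⟩)
        · exact ⟨h1, h2⟩
        · omega
  have hmemS : ∀ x : Int, x ∈ S ↔ x ∈ A := fun x =>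
    PySem.List.mem_sorted A (fun x => x) false x
  have hltS : S.Pairwise (· < ·) := by
    have hle : S.Pairwise (fun a b => a ≤ b) := PySem.List.sorted_pairwise A (fun x => x)
    have hnd : S.Nodup := (PySem.List.sorted_perm A (fun x => x) false).nodup_iff.mpr hndA
    exact (hle.and hnd).imp (fun hab => lt_of_le_of_ne hab.1 hab.2)
  have hbnd : ∀ a ∈ S, 0 ≤ a ∧ a < n := by
    intro a haS
    rcases (hmemA a).mp ((hmemS a).mp haS) with ⟨-, h1, h2⟩ | ⟨h1, h2 | h2⟩ <;> omega
  by_cases hn : 0 < n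
  · obtain ⟨m, rfl⟩ : ∃ m : Nat, n = (m : Int) := ⟨n.toNat, by omega⟩
    have hm : 0 < m := by exact_mod_cast hn
    have hlbl : ((PySem.List.pyRange 0 (m : Int) 1).map
        (fun i => calc_steps.contains i)).length = m := by
      simp [PySem.List.length_pyRange_one]
    rw [if_pos hn]
    apply List.ext_getElem?
    intro i
    by_cases hi : i < m
    · rw [pvRunTail_getElem? S 0 (m : Int) hltS hbnd i (by omega)]
      rw [pvASet_getElem? _ i (by omega), hlbl]
      by_cases hcase : i = 0 ∨ i = m - 1
      · rw [if_pos hcase]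
        have hx : ((0 : Int) + (i : Int)) ∈ S := by
          rw [hmemS, hmemA]
          rcases hcase with rfl | rfl
          · exact Or.inr ⟨hn, Or.inl (by omega)⟩
          · exact Or.inr ⟨hn, Or.inr (by omega)⟩
        exact congrArg some (decide_eq_true hx).symm
      · rw [if_neg hcase]
        rw [PySem.List.getElem?_map_pyRange_zero _ _ _ hi]
        have hiff : (((0 : Int) + (i : Int)) ∈ S) ↔ (i : Int) ∈ calc_steps := by
          rw [hmemS, hmemA, zero_add]
          constructor
          · rintro (⟨h1, -⟩ | ⟨-, h2 | h2⟩)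
            · exact h1
            · exact absurd (by exact_mod_cast h2) (fun h => hcase (Or.inl h))
            · exact absurd (by omega : i = m - 1) (fun h => hcase (Or.inr h))
          · intro h1
            exact Or.inl ⟨h1, by omega, by omega⟩
        refine congrArg some ?_
        by_cases hc : (i : Int) ∈ calc_steps
        · rw [decide_eq_true (hiff.mpr hc), List.contains_iff_mem.mpr hc]
        · rw [decide_eq_false (fun h => hc (hiff.mp h))]
          exact Bool.eq_false_iff.mpr (fun h => hc (List.contains_iff_mem.mp h))
    · have h1 : ((((PySem.List.pyRange 0 ((m : Nat) : Int) 1).map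
          (fun i => calc_steps.contains i)).set 0 true).set
            ((((PySem.List.pyRange 0 ((m : Nat) : Int) 1).map
              (fun i => calc_steps.contains i)).length) - 1) true)[i]? = none :=
        List.getElem?_eq_none (by simp only [List.length_set, hlbl]; omega)
      have h2 : (pvRunTail S 0 ((m : Nat) : Int))[i]? = none :=
        List.getElem?_eq_none (by rw [pvRunTail_length S 0 _ hltS hbnd]; omega)
      rw [h1, h2]
  · have hF : calc_steps.filter (fun s => decide (0 ≤ s ∧ s < n)) = [] := by
      rw [List.filter_eq_nil_iff]
      intro a _
      simp only [decide_eq_true_eq]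
      omega
    have hAnil : A = [] := by rw [hA, if_neg hn, hF]; rfl
    have hSnil : S = [] := by rw [hS, hAnil]; rfl
    rw [if_neg hn, hSnil, PySem.List.pyRange_one_eq_nil (by omega)]
    show ([] : List Bool) = pvRunTail [] 0 n
    rw [pvRunTail]
    have hz : (n - 0).toNat = 0 := by omega
    rw [hz]
    rfl

-- ===== VERDICT (by name: the statement is the Claim_ definition above) =====
theorem resolve_cache_plan_spec : Claim_equal_resolve_cache_plan := by
  intro cache n _ _
  unfold Spec_resolve_cache_plan resolve_cache_plan resolve_cache_plan_alt
  simp only [pvDispatch_eq]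
  cases pvTargetB (PySem.Str.lower cache) with
  | none => rfl
  | some t =>
    dsimp only
    cases PySem.Dict.get? get_qwen_style_calc_dict t with
    | none => rfl
    | some L =>
      dsimp only
      have h := pvSchedule_eq L n
      dsimp only at h
      rw [h]
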